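-- pv_equiv track=rewrite | github.com/remixknighx/quantitative | exercise/leetcode/backspace_string_compare.py | get_final_string
-- ===== SOURCE A (Python) =====
-- def get_final_string(text: str):
--     str_stack = []
--     for i in range(0, len(text)):
--         if text[i] == '#':
--             if len(str_stack) != 0:
--                 str_stack.pop(len(str_stack)-1)
--         else:
--             str_stack.append(text[i])
--     return str_stack
-- ===== SOURCE B (Python) =====
-- def get_final_string(text: str):
--     skip = 0
--     res = []
--     for ch in reversed(text):
--         if ch == '#':
--             skip += 1
--         elif skip:
--             skip -= 1
--         else:
--             res.append(ch)
--     res.reverse()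
--     return res
-- ===== Notes on version B (the rewrite author's own statement) =====
-- stated objective: alternative
-- what changed: Replaces the forward stack with pushes and pops by a single right-to-left scan that keeps an integer skip counter of pending backspaces and reverses the collected survivors at the end.
import Mathlib
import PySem

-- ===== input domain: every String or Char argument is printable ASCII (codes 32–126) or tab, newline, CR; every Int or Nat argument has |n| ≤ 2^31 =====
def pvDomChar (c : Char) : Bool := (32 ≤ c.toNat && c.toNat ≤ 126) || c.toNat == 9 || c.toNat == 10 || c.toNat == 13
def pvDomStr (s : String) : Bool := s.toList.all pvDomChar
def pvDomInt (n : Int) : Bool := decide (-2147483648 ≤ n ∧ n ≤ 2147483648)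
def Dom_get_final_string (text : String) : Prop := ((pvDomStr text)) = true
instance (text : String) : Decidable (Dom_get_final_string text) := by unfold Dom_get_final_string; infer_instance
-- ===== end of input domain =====

-- B replaces A's forward stack (push/pop) by a backward scan with a skip counter; alternative decomposition, same cost.

-- ===== PORT A =====
-- forward loop: push each char, '#' pops the last element if the stack is nonempty
def pvStepA (st : List String) (c : Char) : List String :=
  if c = '#' then (if st.length ≠ 0 then st.dropLast else st)
  else st ++ [c.toString]

def get_final_string (text : String) : List String :=
  text.toList.foldl pvStepA []

-- ===== PORT B =====
-- backward loop over reversed(text): '#' increments skip, skip>0 swallows a char, else collect; reverse at end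
def pvStepB (st : Nat × List String) (c : Char) : Nat × List String :=
  if c = '#' then (st.1 + 1, st.2)
  else if st.1 ≠ 0 then (st.1 - 1, st.2)
  else (st.1, st.2 ++ [c.toString])

def get_final_string_alt (text : String) : List String :=
  (text.toList.reverse.foldl pvStepB (0, [])).2.reverse

-- ===== PRECONDITION & SPEC =====
def Spec_get_final_string (text : String) (out : List String) : Prop := out = get_final_string_alt text
instance (text : String) (out : List String) : Decidable (Spec_get_final_string text out) := by unfold Spec_get_final_string; infer_instance

-- ===== CLAIM (what is proved, stated in full; the proofs are below) =====
def Claim_equal_get_final_string : Prop := ∀ (text : String), Dom_get_final_string text → Spec_get_final_string text (get_final_string text)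

-- ===== LEMMAS AND PROOFS =====

-- drop the last k elements
def pvDropR (k : Nat) (l : List String) : List String := (l.reverse.drop k).reverse

theorem pvFoldB_shift (l : List Char) (k : Nat) (r : List String) :
    l.foldl pvStepB (k, r) = ((l.foldl pvStepB (k, [])).1, r ++ (l.foldl pvStepB (k, [])).2) := by
  induction l generalizing k r with
  | nil => simp
  | cons c t ih =>
    simp only [List.foldl_cons, pvStepB]
    by_cases hc : c = '#'
    · rw [if_pos hc, if_pos hc, ih]
    · rw [if_neg hc, if_neg hc]
      by_cases hk : k ≠ 0
      · rw [if_pos hk, if_pos hk, ih]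
      · rw [if_neg hk, if_neg hk]
        rw [ih (r := r ++ [c.toString]), ih (r := [] ++ [c.toString])]
        simp

theorem pvReverse_dropLast (l : List String) : l.dropLast.reverse = l.reverse.drop 1 := by
  induction l using List.reverseRecOn with
  | nil => simp
  | append_singleton t c ih => simp

theorem pvDropR_zero (l : List String) : pvDropR 0 l = l := by simp [pvDropR]

theorem pvMain (s : List Char) (k : Nat) :
    (s.reverse.foldl pvStepB (k, [])).2.reverse = pvDropR k (s.foldl pvStepA []) := by
  induction s using List.reverseRecOn generalizing k with
  | nil => simp [pvDropR]
  | append_singleton t c ih =>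
    have hrev : (t ++ [c]).reverse = c :: t.reverse := by simp
    rw [hrev, List.foldl_cons, List.foldl_append]
    simp only [List.foldl_cons, List.foldl_nil, pvStepB, pvStepA]
    by_cases hc : c = '#'
    · -- '#': skip+1 on the B side, dropLast on the A side
      rw [if_pos hc, if_pos hc, ih (k + 1)]
      have hA : (if (t.foldl pvStepA []).length ≠ 0 then (t.foldl pvStepA []).dropLast
                 else t.foldl pvStepA []) = (t.foldl pvStepA []).dropLast := by
        by_cases h : (t.foldl pvStepA []).length ≠ 0 <;> simp_all
      rw [hA]
      unfold pvDropR
      congr 1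
      rw [pvReverse_dropLast, List.drop_drop]
      congr 1
      omega
    · rw [if_neg hc, if_neg hc]
      by_cases hk : k ≠ 0
      · -- pending skip swallows c; A appended c but pvDropR k removes it
        rw [if_pos hk, ih (k - 1)]
        obtain ⟨j, rfl⟩ : ∃ j, k = j + 1 := ⟨k - 1, by omega⟩
        simp [pvDropR]
      · -- no skip: c survives, appended on both sides
        rw [if_neg hk, pvFoldB_shift]
        simp only [ne_eq, not_not] at hk
        subst hk
        show ([] ++ [c.toString] ++ (List.foldl pvStepB (0, []) t.reverse).2).reverse = _
        rw [List.nil_append, List.reverse_append, List.reverse_singleton, ih 0,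
          pvDropR_zero, pvDropR_zero]

-- ===== VERDICT (by name: the statement is the Claim_ definition above) =====
theorem get_final_string_spec : Claim_equal_get_final_string := by
  intro text _
  unfold Spec_get_final_string get_final_string get_final_string_alt
  rw [pvMain text.toList 0, pvDropR_zero]
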